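-- pv_equiv track=rewrite | github.com/madamczak/ZamenaKurs | dzien2petleiczas/whitelists.py | combine_all_possible_machine_numbers
-- ===== SOURCE A (Python) =====
-- def combine_all_possible_machine_numbers(count_numbers_dictionary):
--     # currently supporting up to 3 regex value segments
--     combined_numbers = []
--     max_depth_number = max(count_numbers_dictionary.keys())
--     if max_depth_number > 2:
--         raise Exception("Not supported")
--
--     zero_order_numbers = count_numbers_dictionary.get(0)
--     first_order_numbers = count_numbers_dictionary.get(1)
--     second_order_numbers = count_numbers_dictionary.get(1)
--
--     if max_depth_number == 0:
--         return zero_order_numbers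
--     elif max_depth_number == 1:
--         for zero_num in zero_order_numbers:
--             for first_num in first_order_numbers:
--                 combined_numbers.append(zero_num + first_num)
--     elif max_depth_number == 2:
--         for zero_num in zero_order_numbers:
--             for first_num in first_order_numbers:
--                 for second_num in second_order_numbers:
--                     combined_numbers.append(zero_num + first_num + second_num)
--
--     return combined_numbers
-- ===== SOURCE B (Python) =====
-- def combine_all_possible_machine_numbers(count_numbers_dictionary):
--     depth = max(count_numbers_dictionary.keys())
--     if depth > 2:
--         raise Exception("Not supported")
--     # groups of segments in A's exact key order: [get(0)] then depth copies of get(1)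
--     groups = [count_numbers_dictionary.get(0)] + [count_numbers_dictionary.get(1)] * depth
--     result = groups[0]
--     for group in groups[1:]:
--         result = [a + b for a in result for b in group]
--     return result
-- ===== Notes on version B (the rewrite author's own statement) =====
-- stated objective: alternative
-- what changed: Replaces A's three fixed branches of hand-written nested append loops by building the list of segment groups (preserving A's get(1)-for-second key order) and folding a single cartesian-product step over it.
-- outside the precondition, e.g. on combine_all_possible_machine_numbers({-1: ['x']}): A returns [], B returns None
import Mathlib
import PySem

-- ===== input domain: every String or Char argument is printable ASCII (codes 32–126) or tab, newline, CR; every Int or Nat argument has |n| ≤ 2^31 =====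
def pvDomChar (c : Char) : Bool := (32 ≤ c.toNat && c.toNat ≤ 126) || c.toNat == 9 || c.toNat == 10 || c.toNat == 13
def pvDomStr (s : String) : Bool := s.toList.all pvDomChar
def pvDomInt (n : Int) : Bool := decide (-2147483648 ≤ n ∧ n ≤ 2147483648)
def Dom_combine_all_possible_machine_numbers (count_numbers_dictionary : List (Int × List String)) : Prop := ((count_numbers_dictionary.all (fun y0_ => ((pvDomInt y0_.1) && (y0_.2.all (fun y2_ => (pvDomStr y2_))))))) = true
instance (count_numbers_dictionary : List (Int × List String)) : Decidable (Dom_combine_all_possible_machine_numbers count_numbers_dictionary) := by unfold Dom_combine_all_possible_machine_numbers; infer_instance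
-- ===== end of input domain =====

-- B builds the list of segment groups (same keys, including A's get(1)-for-second) and folds one
-- cartesian-product step over it instead of A's three fixed branches of nested append loops.

-- ===== PORT A =====
def combine_all_possible_machine_numbers (count_numbers_dictionary : List (Int × List String)) : List String :=
  let d := PySem.Dict.mk count_numbers_dictionary
  match PySem.List.max? d.keys (fun k => k) with
  | none => []            -- max([]) raises ValueError: excluded by Pre_
  | some max_depth_number =>
    if max_depth_number > 2 then []   -- raise Exception("Not supported"): excluded by Pre_
    else
      let zero_order_numbers := (d.get? 0).getD []   -- .get(0); None (iterated → TypeError) only outside Pre_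
      let first_order_numbers := (d.get? 1).getD []
      let second_order_numbers := (d.get? 1).getD []
      if max_depth_number = 0 then zero_order_numbers
      else if max_depth_number = 1 then
        zero_order_numbers.foldl (fun acc z =>
          first_order_numbers.foldl (fun acc f => acc ++ [z ++ f]) acc) []
      else if max_depth_number = 2 then
        zero_order_numbers.foldl (fun acc z =>
          first_order_numbers.foldl (fun acc f =>
            second_order_numbers.foldl (fun acc s => acc ++ [z ++ f ++ s]) acc) acc) []
      else []             -- max_depth_number < 0: no branch fires, combined_numbers stays []

-- ===== PORT B =====
def combine_all_possible_machine_numbers_alt (count_numbers_dictionary : List (Int × List String)) : List String :=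
  let d := PySem.Dict.mk count_numbers_dictionary
  match PySem.List.max? d.keys (fun k => k) with
  | none => []            -- max([]) raises ValueError: excluded by Pre_
  | some depth =>
    if depth > 2 then []  -- raise Exception("Not supported"): excluded by Pre_
    else
      -- [d.get(0)] + [d.get(1)] * depth; get(·) is only None outside Pre_, rendered as getD []
      let groups := (d.get? 0).getD [] :: List.replicate depth.toNat ((d.get? 1).getD [])
      match groups with
      | [] => []          -- unreachable: groups is nonempty by construction
      | g0 :: rest =>
        rest.foldl (fun res g => res.flatMap (fun a => g.map (fun b => a ++ b))) g0

-- ===== PRECONDITION & SPEC =====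
-- Pre_ excludes inputs on which A raises (empty dict → ValueError; max key > 2 → Exception;
-- max key ≥ 1 with key 1 absent → TypeError iterating None), dicts whose keys are all negative
-- (A falls through every branch and returns an accidental [] while B returns None, not a list),
-- and association lists with duplicate keys, which denote no single Python dict (first-match vs
-- last-wins readings disagree).
def Pre_combine_all_possible_machine_numbers (count_numbers_dictionary : List (Int × List String)) : Prop :=
  (count_numbers_dictionary.map (·.1)).Nodup ∧
  (0 : Int) ∈ count_numbers_dictionary.map (·.1) ∧
  (∀ k ∈ count_numbers_dictionary.map (·.1), k ≤ 2) ∧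
  ((∃ k ∈ count_numbers_dictionary.map (·.1), (1 : Int) ≤ k) → (1 : Int) ∈ count_numbers_dictionary.map (·.1))
instance (count_numbers_dictionary : List (Int × List String)) : Decidable (Pre_combine_all_possible_machine_numbers count_numbers_dictionary) := by unfold Pre_combine_all_possible_machine_numbers; infer_instance

def pvWitness_combine_all_possible_machine_numbers : (List (Int × List String)) := ([(0, ["1", "2"]), (1, ["7"])])

def Spec_combine_all_possible_machine_numbers (count_numbers_dictionary : List (Int × List String)) (out : List String) : Prop := out = combine_all_possible_machine_numbers_alt count_numbers_dictionary
instance (count_numbers_dictionary : List (Int × List String)) (out : List String) : Decidable (Spec_combine_all_possible_machine_numbers count_numbers_dictionary out) := by unfold Spec_combine_all_possible_machine_numbers; infer_instance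

-- ===== CLAIM (what is proved, stated in full; the proofs are below) =====
def Claim_equal_combine_all_possible_machine_numbers : Prop := ∀ (count_numbers_dictionary : List (Int × List String)), Dom_combine_all_possible_machine_numbers count_numbers_dictionary → Pre_combine_all_possible_machine_numbers count_numbers_dictionary → Spec_combine_all_possible_machine_numbers count_numbers_dictionary (combine_all_possible_machine_numbers count_numbers_dictionary)

-- ===== LEMMAS AND PROOFS =====

theorem pv_equal (cnd : List (Int × List String))
    (hpre : Pre_combine_all_possible_machine_numbers cnd) :
    combine_all_possible_machine_numbers cnd = combine_all_possible_machine_numbers_alt cnd := by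
  obtain ⟨-, h0, hle, h1⟩ := hpre
  have hkeys : (PySem.Dict.mk cnd).keys = cnd.map (·.1) := rfl
  -- max(keys) exists and lies in [0, 2]
  have hne : (PySem.Dict.mk cnd).keys ≠ [] := by
    rw [hkeys]; intro h; rw [h] at h0; exact (List.not_mem_nil) h0
  obtain ⟨m, hm⟩ : ∃ m, PySem.List.max? (PySem.Dict.mk cnd).keys (fun k => k) = some m := by
    cases hmx : PySem.List.max? (PySem.Dict.mk cnd).keys (fun k => k) with
    | none => exact absurd ((PySem.List.max?_eq_none_iff _ _).mp hmx) hne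
    | some m => exact ⟨m, rfl⟩
  have hmem : m ∈ cnd.map (·.1) := by rw [← hkeys]; exact PySem.List.max?_mem hm
  have hmax : ∀ y ∈ cnd.map (·.1), y ≤ m := by
    intro y hy; rw [← hkeys] at hy; exact PySem.List.max?_isMax hm y hy
  have hm0 : 0 ≤ m := hmax 0 h0
  have hm2 : m ≤ 2 := hle m hmem
  unfold combine_all_possible_machine_numbers combine_all_possible_machine_numbers_alt
  simp only [hm]
  interval_cases m
  · -- depth 0
    norm_num
  · -- depth 1
    norm_num
    simp only [← List.flatMap_def, ← List.map_eq_flatMap]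
  · -- depth 2
    norm_num
    rw [show ((2 : Int).toNat) = 2 from rfl]
    simp only [List.replicate_succ, List.replicate_zero, List.foldl_cons, List.foldl_nil]
    simp only [← List.flatMap_def, ← List.map_eq_flatMap, List.flatMap_assoc, List.flatMap_map,
               String.append_assoc]

-- ===== VERDICT (by name: the statement is the Claim_ definition above) =====
theorem combine_all_possible_machine_numbers_spec : Claim_equal_combine_all_possible_machine_numbers := by
  intro cnd _ hpre
  exact pv_equal cnd hpre
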